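-- pv_equiv track=rewrite | github.com/Osman-programming-galaxy96/codingbat | string.py | string_splosion
-- ===== SOURCE A (Python) =====
-- def string_splosion(str):
--   new_str = ''
--   for i in range(len(str)):
--     if(len(str) == 1):
--       return str
--     if(i == 0):
--         new_str += str[i]*2
--     elif (i == 1):
--         new_str += str[i]
--     else:
--         new_str += str[0:i+1]
--   return new_str
-- ===== SOURCE B (Python) =====
-- def string_splosion(str):
--   cur = ''
--   parts = []
--   for ch in str:
--     cur += ch
--     parts.append(cur)
--   return ''.join(parts)
-- ===== Notes on version B (the rewrite author's own statement) =====
-- stated objective: simpler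
-- what changed: Replaces the index loop with its three-way branch (doubled first char, bare second char, reslice str[0:i+1] from index 0 for the rest) and the early return for length-1 strings by a single uniform pass that threads a growing prefix accumulator over the characters and joins the collected prefixes.
import Mathlib
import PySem

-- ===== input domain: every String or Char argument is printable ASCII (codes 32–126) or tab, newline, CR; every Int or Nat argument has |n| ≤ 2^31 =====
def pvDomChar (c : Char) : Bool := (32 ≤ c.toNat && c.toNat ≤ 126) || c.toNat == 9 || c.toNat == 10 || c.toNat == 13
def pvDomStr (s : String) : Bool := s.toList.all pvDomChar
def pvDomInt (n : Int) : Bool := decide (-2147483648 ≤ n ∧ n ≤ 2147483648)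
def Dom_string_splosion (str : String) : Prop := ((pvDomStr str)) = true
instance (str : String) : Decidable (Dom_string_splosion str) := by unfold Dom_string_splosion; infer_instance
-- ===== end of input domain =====

-- B replaces A's index loop (doubled first char / bare second char / reslice str[0:i+1]) and its
-- length-1 early return by one uniform pass threading a growing prefix accumulator; objective: simpler.

-- ===== PORT A =====
-- the loop over range(len(str)); the length-1 test inside the body early-returns str itself
def stringSplosionLoopA (cs : List Char) (idxs : List Int) (acc : List Char) : List Char :=
  match idxs with
  | [] => acc
  | i :: rest =>
    if PySem.List.len cs == 1 then cs                        -- 'return str'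
    else if i == 0 then
      -- str[i]*2 ; i is always in range here, so pyGet? is some (Option.toList is exact)
      stringSplosionLoopA cs rest (acc ++ (PySem.List.pyGet? cs i).toList ++ (PySem.List.pyGet? cs i).toList)
    else if i == 1 then
      stringSplosionLoopA cs rest (acc ++ (PySem.List.pyGet? cs i).toList)
    else
      stringSplosionLoopA cs rest (acc ++ PySem.List.slice cs (some 0) (some (i + 1)))

def string_splosion (str : String) : String :=
  String.ofList (stringSplosionLoopA str.toList
    (PySem.List.pyRange 0 (PySem.List.len str.toList) 1) [])

-- ===== PORT B =====
-- one step of B's loop: cur += ch; parts.append(cur)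
def stringSplosionStepB (p : List Char × List (List Char)) (ch : Char) : List Char × List (List Char) :=
  (p.1 ++ [ch], p.2 ++ [p.1 ++ [ch]])

-- ''.join(parts) with the empty separator is plain concatenation (flatten) — exact
def string_splosion_alt (str : String) : String :=
  String.ofList ((str.toList.foldl stringSplosionStepB ([], [])).2.flatten)

-- ===== PRECONDITION & SPEC =====
def Spec_string_splosion (str : String) (out : String) : Prop := out = string_splosion_alt str
instance (str : String) (out : String) : Decidable (Spec_string_splosion str out) := by unfold Spec_string_splosion; infer_instance

-- ===== CLAIM (what is proved, stated in full; the proofs are below) =====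
def Claim_equal_string_splosion : Prop := ∀ (str : String), Dom_string_splosion str → Spec_string_splosion str (string_splosion str)

-- ===== LEMMAS AND PROOFS =====

-- concatenation of the nonempty prefixes of cs, each preceded by cur: the common value
def catPref (cur : List Char) (cs : List Char) : List Char :=
  match cs with
  | [] => []
  | c :: rest => (cur ++ [c]) ++ catPref (cur ++ [c]) rest

theorem foldB_flatten (cs : List Char) : ∀ (cur : List Char) (parts : List (List Char)),
    (cs.foldl stringSplosionStepB (cur, parts)).2.flatten = parts.flatten ++ catPref cur cs := by
  induction cs with
  | nil => intro cur parts; simp [catPref]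
  | cons c rest ih =>
    intro cur parts
    simp only [List.foldl_cons, stringSplosionStepB, catPref]
    rw [ih]
    simp

theorem loopA_tail (cs : List Char) (h1 : cs.length ≠ 1) :
    ∀ (k i : Nat) (acc : List Char), 2 ≤ i → cs.length = i + k →
    stringSplosionLoopA cs (PySem.List.pyRange (i : Int) (cs.length : Int) 1) acc
      = acc ++ catPref (cs.take i) (cs.drop i) := by
  intro k
  induction k with
  | zero =>
    intro i acc _ hlen
    rw [hlen]
    rw [PySem.List.pyRange_one_eq_nil (by omega)]
    have hd : cs.drop i = [] := List.drop_eq_nil_of_le (by omega)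
    rw [hd]
    simp [stringSplosionLoopA, catPref]
  | succ k ih =>
    intro i acc hi hlen
    have hik : (i : Int) < (cs.length : Int) := by omega
    rw [PySem.List.pyRange_one_cons hik]
    have hlt : i < cs.length := by omega
    simp only [stringSplosionLoopA]
    have hc1 : (PySem.List.len cs == (1 : Int)) = false := by
      simp [PySem.List.len_eq]; omega
    have hc2 : ((i : Int) == 0) = false := by simp; omega
    have hc3 : ((i : Int) == 1) = false := by simp; omega
    rw [hc1]; simp only [Bool.false_eq_true, if_false]
    rw [hc2]; simp only [Bool.false_eq_true, if_false]
    rw [hc3]; simp only [Bool.false_eq_true, if_false]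
    have hcast : ((i : Int) + 1) = ((i + 1 : Nat) : Int) := by push_cast; ring
    have hslice : PySem.List.slice cs (some 0) (some ((i : Int) + 1)) = cs.take (i + 1) := by
      rw [hcast, PySem.List.slice_zero_start, PySem.List.slice_to_natCast]
    rw [hslice, hcast, ih (i + 1) _ (by omega) (by omega)]
    have hdrop : cs.drop i = cs[i] :: cs.drop (i + 1) := List.drop_eq_getElem_cons hlt
    have htake : cs.take (i + 1) = cs.take i ++ [cs[i]] := by
      rw [List.take_add_one, List.getElem?_eq_getElem hlt]; rfl
    rw [hdrop]
    simp only [catPref, ← htake]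
    simp

theorem main_lists (cs : List Char) :
    stringSplosionLoopA cs (PySem.List.pyRange 0 (PySem.List.len cs) 1) []
      = (cs.foldl stringSplosionStepB ([], [])).2.flatten := by
  rw [foldB_flatten]
  simp only [List.flatten_nil, List.nil_append]
  match cs with
  | [] => simp [PySem.List.len_eq, PySem.List.pyRange_one_eq_nil, stringSplosionLoopA, catPref]
  | [c] =>
    rw [show PySem.List.len [c] = (1 : Int) by simp [PySem.List.len_eq]]
    rw [show PySem.List.pyRange 0 1 1 = [0] from PySem.List.pyRange_one_singleton 0]
    simp [stringSplosionLoopA, catPref]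
  | c0 :: c1 :: rest =>
    have hlen : PySem.List.len (c0 :: c1 :: rest) = ((rest.length + 2 : Nat) : Int) := by
      simp [PySem.List.len_eq]; omega
    rw [hlen]
    have h0 : (0 : Int) < ((rest.length + 2 : Nat) : Int) := by omega
    have h1 : (1 : Int) < ((rest.length + 2 : Nat) : Int) := by omega
    rw [PySem.List.pyRange_one_cons h0, show (0 : Int) + 1 = 1 from rfl,
        PySem.List.pyRange_one_cons h1, show (1 : Int) + 1 = ((2 : Nat) : Int) by norm_num]
    have hne1 : (c0 :: c1 :: rest).length ≠ 1 := by simp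
    have hc1 : (PySem.List.len (c0 :: c1 :: rest) == (1 : Int)) = false := by
      simp [PySem.List.len_eq]; omega
    simp only [stringSplosionLoopA, hc1, Bool.false_eq_true, if_false, beq_self_eq_true, if_true,
      show ((0 : Int) == 1) = false from rfl, show ((1 : Int) == 0) = false from rfl]
    rw [show ((rest.length + 2 : Nat) : Int) = (((c0 :: c1 :: rest).length : Nat) : Int) by simp; omega]
    rw [loopA_tail (c0 :: c1 :: rest) hne1 rest.length 2 _ (by omega) (by simp; omega)]
    rw [show ((1 : Int)) = ((1 : Nat) : Int) by norm_num]
    simp [PySem.List.pyGet?_zero_cons, catPref]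

-- ===== VERDICT (by name: the statement is the Claim_ definition above) =====
theorem string_splosion_spec : Claim_equal_string_splosion := by
  intro str _
  unfold Spec_string_splosion string_splosion string_splosion_alt
  rw [main_lists]
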